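-- pv_equiv track=rewrite | github.com/Komalpreet-kaur39/sabudh_python | Task1/a1.py | extract_continuous_elements
-- ===== SOURCE A (Python) =====
-- def extract_continuous_elements(lst, num_elements):
--     result = []
--     n = len(lst)
--
--     # Loop through the list to find sublists of length `num_elements`
--     for i in range(n - num_elements + 1):
--         # Extract the sublist
--         sublist = lst[i:i + num_elements]
--
--         # Check if the sublist has consecutive numbers
--         if all(sublist[j] + 1 == sublist[j + 1] for j in range(len(sublist) - 1)):
--             result.append(sublist)
--
--     return result
-- ===== SOURCE B (Python) =====
-- def extract_continuous_elements(lst, num_elements):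
--     # One streaming pass: maintain the length of the consecutive run ending at
--     # the current element; emit a window whenever the run covers num_elements.
--     result = []
--     run = 0
--     prev = None
--     for x in lst:
--         run = run + 1 if prev is not None and prev + 1 == x else 1
--         if run >= num_elements:
--             result.append(list(range(x - num_elements + 1, x + 1)))
--         prev = x
--     return result
-- ===== Notes on version B (the rewrite author's own statement) =====
-- stated objective: faster
-- what changed: Replaced the O(n*k) scan that re-checks every length-k slice with a single streaming pass that maintains the length of the consecutive run ending at the current element and emits a window (rebuilt as range(x-k+1, x+1)) whenever the run reaches k.
-- outside the precondition, e.g. on extract_continuous_elements([1, 2], 0): A returns [[], [], []], B returns [[], []]; on extract_continuous_elements([5, 7], -1): A returns [[5], [], [], []], B returns [[], []]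
import Mathlib
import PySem

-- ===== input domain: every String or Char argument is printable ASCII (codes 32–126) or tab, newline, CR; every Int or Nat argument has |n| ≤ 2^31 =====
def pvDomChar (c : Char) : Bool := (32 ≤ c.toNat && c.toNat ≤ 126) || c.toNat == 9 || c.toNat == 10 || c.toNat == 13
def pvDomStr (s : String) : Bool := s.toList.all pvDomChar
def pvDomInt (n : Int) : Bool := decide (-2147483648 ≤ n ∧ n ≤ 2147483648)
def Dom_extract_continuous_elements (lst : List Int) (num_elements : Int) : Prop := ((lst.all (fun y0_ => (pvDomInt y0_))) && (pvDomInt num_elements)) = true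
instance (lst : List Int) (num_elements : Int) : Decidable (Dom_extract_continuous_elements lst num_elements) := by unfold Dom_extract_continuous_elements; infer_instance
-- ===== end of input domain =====

-- B replaces A's O(n*k) re-check of every length-k slice by one streaming pass keeping the
-- consecutive-run length ending at the current element (objective: faster, asymptotic).

-- ===== PORT A =====
def extract_continuous_elements (lst : List Int) (num_elements : Int) : List (List Int) :=
  let n : Int := lst.length
  (PySem.List.pyRange 0 (n - num_elements + 1) 1).foldl
    (fun result i =>
      let sublist := PySem.List.slice lst (some i) (some (i + num_elements))
      if (PySem.List.pyRange 0 ((sublist.length : Int) - 1) 1).all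
           (fun j => PySem.List.pyGetD sublist j 0 + 1 == PySem.List.pyGetD sublist (j + 1) 0)
      then result ++ [sublist] else result) []

-- ===== PORT B =====
def extract_continuous_elements_alt (lst : List Int) (num_elements : Int) : List (List Int) :=
  (lst.foldl
    (fun (st : List (List Int) × Int × Option Int) x =>
      let run : Int := match st.2.2 with
        | some p => if p + 1 = x then st.2.1 + 1 else 1
        | none => 1
      let res := if num_elements ≤ run
        then st.1 ++ [PySem.List.pyRange (x - num_elements + 1) (x + 1) 1]
        else st.1
      (res, run, some x)) ([], 0, none)).1

-- ===== PRECONDITION & SPEC =====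
-- Pre_ excludes num_elements ≤ 0, where A's output (n+1 empty windows for k = 0, arbitrary
-- negative-length slice fragments for k < 0) is an accident of Python slicing, not a value
-- anyone would specify for 'windows of k consecutive integers'.
def Pre_extract_continuous_elements (lst : List Int) (num_elements : Int) : Prop :=
  1 ≤ num_elements
instance (lst : List Int) (num_elements : Int) : Decidable (Pre_extract_continuous_elements lst num_elements) := by unfold Pre_extract_continuous_elements; infer_instance
def pvWitness_extract_continuous_elements : List Int × Int := ([1, 2, 3, 5, 6], 2)

def Spec_extract_continuous_elements (lst : List Int) (num_elements : Int) (out : List (List Int)) : Prop := out = extract_continuous_elements_alt lst num_elements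
instance (lst : List Int) (num_elements : Int) (out : List (List Int)) : Decidable (Spec_extract_continuous_elements lst num_elements out) := by unfold Spec_extract_continuous_elements; infer_instance

-- ===== CLAIM (what is proved, stated in full; the proofs are below) =====
def Claim_equal_extract_continuous_elements : Prop := ∀ (lst : List Int) (num_elements : Int), Dom_extract_continuous_elements lst num_elements → Pre_extract_continuous_elements lst num_elements → Spec_extract_continuous_elements lst num_elements (extract_continuous_elements lst num_elements)

-- ===== LEMMAS AND PROOFS =====

-- the consecutive-step relation between adjacent elements
abbrev pvStep (a b : Int) : Prop := a + 1 = b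

-- run length ending at the last element, computed on the reversed list
def pvRrun : List Int → Int
  | [] => 0
  | [_] => 1
  | x :: y :: s => if y + 1 = x then pvRrun (y :: s) + 1 else 1

def pvRunVal (l : List Int) : Int := pvRrun l.reverse

theorem pvRrun_pos (x : Int) (s : List Int) : 1 ≤ pvRrun (x :: s) := by
  induction s generalizing x with
  | nil => simp [pvRrun]
  | cons y t ih =>
    simp only [pvRrun]
    split
    · have := ih y; omega
    · omega

theorem pvRunVal_snoc (l : List Int) (x : Int) :
    pvRunVal (l ++ [x]) =
      (match l.getLast? with
       | some p => if p + 1 = x then pvRunVal l + 1 else 1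
       | none => 1) := by
  unfold pvRunVal
  rw [List.reverse_append, List.reverse_singleton, List.singleton_append]
  rcases h : l.reverse with _ | ⟨p, t⟩
  · have hl : l = [] := by simpa using congrArg List.reverse h
    subst hl; simp [pvRrun]
  · have hlast : l.getLast? = some p := by
      rw [← List.head?_reverse, h]; rfl
    rw [hlast]
    simp only [pvRrun]

theorem pvRunVal_pos (l : List Int) (h : l ≠ []) : 1 ≤ pvRunVal l := by
  unfold pvRunVal
  rcases hr : l.reverse with _ | ⟨p, t⟩
  · exact absurd (by simpa using congrArg List.reverse hr) h
  · exact pvRrun_pos p t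

-- a chain over a snoc: chain on the front plus the junction step
theorem pv_chain_concat_iff (t : List Int) (x : Int) :
    List.IsChain pvStep (t ++ [x]) ↔ List.IsChain pvStep t ∧ ∀ a ∈ t.getLast?, pvStep a x := by
  simp [List.isChain_append]

theorem pv_drop_concat_last (s : List Int) (p : Int) (j : Nat) (hj : j ≤ s.length) :
    ((s ++ [p]).drop j).getLast? = some p := by
  rw [List.drop_append_of_le_length hj, List.getLast?_concat]

-- run length ≥ m iff the last m elements form a consecutive chain
theorem pv_run_ge_iff (l : List Int) (x : Int) (m : Nat) (hm : 1 ≤ m) :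
    ((m : Int) ≤ pvRunVal (l ++ [x]) ↔
      (m ≤ l.length + 1 ∧ List.IsChain pvStep ((l ++ [x]).drop (l.length + 1 - m)))) := by
  induction l using List.reverseRecOn generalizing x m with
  | nil =>
    have h1 : pvRunVal [x] = 1 := by simp [pvRunVal, pvRrun]
    simp only [List.nil_append, List.length_nil, Nat.zero_add]
    rw [h1]
    by_cases hm1 : m = 1
    · subst hm1; simp
    · constructor
      · intro h; exfalso; omega
      · rintro ⟨h, -⟩; exfalso; omega
  | append_singleton s p ih =>
    have hsnoc : pvRunVal ((s ++ [p]) ++ [x]) =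
        if p + 1 = x then pvRunVal (s ++ [p]) + 1 else 1 := by
      rw [pvRunVal_snoc, List.getLast?_concat]
    have hlen : (s ++ [p]).length = s.length + 1 := by simp
    rw [hsnoc, hlen]
    by_cases hm1 : m = 1
    · subst hm1
      have hL : (1 : Int) ≤ if p + 1 = x then pvRunVal (s ++ [p]) + 1 else 1 := by
        have := pvRunVal_pos (s ++ [p]) (by simp)
        split <;> omega
      have hidx : s.length + 1 + 1 - 1 = (s ++ [p]).length := by simp
      rw [hidx, List.drop_left]
      exact iff_of_true hL ⟨by omega, by simp⟩
    · have hm2 : 2 ≤ m := by omega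
      by_cases hpx : p + 1 = x
      · rw [if_pos hpx]
        have hih := ih p (m - 1) (by omega)
        have hcast : ((m - 1 : Nat) : Int) = (m : Int) - 1 := by omega
        constructor
        · intro h
          obtain ⟨h1, h2⟩ := hih.mp (by omega)
          refine ⟨by omega, ?_⟩
          have heq : s.length + 1 + 1 - m = s.length + 1 - (m - 1) := by omega
          rw [heq, List.drop_append_of_le_length (by simp)]
          rw [pv_chain_concat_iff]
          refine ⟨h2, ?_⟩
          intro a ha
          rw [pv_drop_concat_last s p _ (by omega)] at ha
          simp only [Option.mem_some_iff] at ha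
          subst ha; exact hpx
        · rintro ⟨h1, h2⟩
          have heq : s.length + 1 + 1 - m = s.length + 1 - (m - 1) := by omega
          rw [heq, List.drop_append_of_le_length (by simp)] at h2
          rw [pv_chain_concat_iff] at h2
          have := hih.mpr ⟨by omega, h2.1⟩
          omega
      · rw [if_neg hpx]
        constructor
        · intro h; exfalso; omega
        · rintro ⟨h1, h2⟩
          exfalso
          apply hpx
          rw [List.drop_append_of_le_length (by simp; omega)] at h2
          rw [pv_chain_concat_iff] at h2
          have hj := h2.2 p (by rw [pv_drop_concat_last s p _ (by omega)]; rfl)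
          exact hj

-- a consecutive chain ending at x is exactly range(x - len + 1, x + 1)
theorem pv_window_eq (w : List Int) (x : Int) (h : List.IsChain pvStep (w ++ [x])) :
    PySem.List.pyRange (x - w.length) (x + 1) 1 = w ++ [x] := by
  induction w using List.reverseRecOn generalizing x with
  | nil => simpa using PySem.List.pyRange_one_singleton x
  | append_singleton s p ih =>
    rw [pv_chain_concat_iff, List.getLast?_concat] at h
    have hpx : p + 1 = x := h.2 p rfl
    rw [PySem.List.pyRange_one_succ_right (by simp; omega)]
    have ha : x - ((s ++ [p]).length : Int) = p - s.length := by simp; omega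
    rw [ha, ← hpx]
    rw [ih p h.1]

-- A's inner all() is the Chain' predicate
theorem pv_all_eq_chain (c : List Int) :
    ((PySem.List.pyRange 0 ((c.length : Int) - 1) 1).all
       (fun j => PySem.List.pyGetD c j 0 + 1 == PySem.List.pyGetD c (j + 1) 0)) =
      decide (List.IsChain pvStep c) := by
  rw [Bool.eq_iff_iff]
  simp only [List.all_eq_true, PySem.List.mem_pyRange_one,
    decide_eq_true_eq, List.isChain_iff_getElem, beq_iff_eq]
  constructor
  · intro h i hi
    have hj := h (i : Int) ⟨by omega, by omega⟩
    rw [show ((i : Int) + 1) = ((i + 1 : Nat) : Int) by push_cast; ring] at hj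
    rw [PySem.List.pyGetD_natCast, PySem.List.pyGetD_natCast] at hj
    rwa [List.getD_eq_getElem c 0 (by omega), List.getD_eq_getElem c 0 (by omega)] at hj
  · intro h j hj
    obtain ⟨hj0, hj1⟩ := hj
    rw [show j = ((j.toNat : Nat) : Int) from (Int.toNat_of_nonneg hj0).symm]
    rw [show ((j.toNat : Int) + 1) = ((j.toNat + 1 : Nat) : Int) by push_cast; ring]
    rw [PySem.List.pyGetD_natCast, PySem.List.pyGetD_natCast]
    rw [List.getD_eq_getElem c 0 (by omega), List.getD_eq_getElem c 0 (by omega)]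
    exact h j.toNat (by omega)

-- A on a snoc: the old windows plus (possibly) the one new window ending at x
theorem pv_A_snoc (l : List Int) (x : Int) (k : Int) (hk : 1 ≤ k) :
    extract_continuous_elements (l ++ [x]) k =
      extract_continuous_elements l k ++
        (if (k.toNat ≤ l.length + 1 ∧ List.IsChain pvStep ((l ++ [x]).drop (l.length + 1 - k.toNat)))
         then [(l ++ [x]).drop (l.length + 1 - k.toNat)] else []) := by
  simp only [extract_continuous_elements, List.length_append, List.length_cons,
    List.length_nil, Nat.zero_add, Nat.cast_add, Nat.cast_one]
  by_cases hbig : (l.length : Int) + 1 < k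
  · rw [PySem.List.pyRange_one_eq_nil (by omega), PySem.List.pyRange_one_eq_nil (by omega)]
    rw [if_neg (by rintro ⟨h1, -⟩; omega)]
    simp
  · have hkle : k ≤ (l.length : Int) + 1 := by omega
    have hsplit : PySem.List.pyRange 0 ((l.length : Int) + 1 - k + 1) 1
        = PySem.List.pyRange 0 ((l.length : Int) - k + 1) 1 ++ [(l.length : Int) - k + 1] := by
      rw [show (l.length : Int) + 1 - k + 1 = ((l.length : Int) - k + 1) + 1 by ring]
      exact PySem.List.pyRange_one_succ_right (by omega)
    rw [hsplit, List.foldl_concat]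
    rw [PySem.List.foldl_congr_mem _ _
      (fun result i =>
        let sublist := PySem.List.slice l (some i) (some (i + k))
        if (PySem.List.pyRange 0 ((sublist.length : Int) - 1) 1).all
             (fun j => PySem.List.pyGetD sublist j 0 + 1 == PySem.List.pyGetD sublist (j + 1) 0)
        then result ++ [sublist] else result) _ ?_]
    swap
    · intro acc i hi
      rw [PySem.List.mem_pyRange_one] at hi
      have hslice : PySem.List.slice (l ++ [x]) (some i) (some (i + k))
          = PySem.List.slice l (some i) (some (i + k)) := by
        rw [PySem.List.slice_toNat (l ++ [x]) (a := i) (b := i + k) (by omega) (by omega),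
            PySem.List.slice_toNat l (a := i) (b := i + k) (by omega) (by omega)]
        rw [List.drop_append_of_le_length (by omega)]
        rw [List.take_append_of_le_length (by simp; omega)]
      simp only [hslice]
    · have hsub : PySem.List.slice (l ++ [x]) (some ((l.length : Int) - k + 1))
          (some ((l.length : Int) - k + 1 + k)) = (l ++ [x]).drop (l.length + 1 - k.toNat) := by
        rw [PySem.List.slice_toNat (l ++ [x]) (a := (l.length : Int) - k + 1)
          (b := (l.length : Int) - k + 1 + k) (by omega) (by omega)]
        have h1 : ((l.length : Int) - k + 1).toNat = l.length + 1 - k.toNat := by omega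
        rw [h1]
        have h2 : ((l.length : Int) - k + 1 + k).toNat - (l.length + 1 - k.toNat)
            = k.toNat := by omega
        rw [h2]
        apply List.take_of_length_le
        simp; omega
      simp only [hsub, pv_all_eq_chain]
      by_cases hch : List.IsChain pvStep ((l ++ [x]).drop (l.length + 1 - k.toNat))
      · have hcond : k.toNat ≤ l.length + 1
            ∧ List.IsChain pvStep ((l ++ [x]).drop (l.length + 1 - k.toNat)) := ⟨by omega, hch⟩
        rw [decide_eq_true hch, if_pos hcond]
        simp
      · rw [decide_eq_false hch]
        rw [if_neg (show ¬(k.toNat ≤ l.length + 1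
          ∧ List.IsChain pvStep ((l ++ [x]).drop (l.length + 1 - k.toNat))) from
          fun hc => hch hc.2)]
        simp

-- A on the empty list is empty
theorem pv_A_nil (k : Int) (hk : 1 ≤ k) : extract_continuous_elements [] k = [] := by
  simp only [extract_continuous_elements, List.length_nil, Nat.cast_zero]
  rw [PySem.List.pyRange_one_eq_nil (by omega)]
  rfl

-- B's emission step produces exactly A's new window
theorem pv_emit_eq (l : List Int) (x k : Int) (hk : 1 ≤ k) :
    (if k ≤ pvRunVal (l ++ [x]) then
       extract_continuous_elements l k ++ [PySem.List.pyRange (x - k + 1) (x + 1) 1]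
     else extract_continuous_elements l k) = extract_continuous_elements (l ++ [x]) k := by
  rw [pv_A_snoc l x k hk]
  by_cases hge : k ≤ pvRunVal (l ++ [x])
  · rw [if_pos hge]
    have hc := (pv_run_ge_iff l x k.toNat (by omega)).mp
      (by rw [Int.toNat_of_nonneg (by omega)]; exact hge)
    rw [if_pos hc]
    obtain ⟨h1, h2⟩ := hc
    have hWsplit : (l ++ [x]).drop (l.length + 1 - k.toNat)
        = l.drop (l.length + 1 - k.toNat) ++ [x] :=
      List.drop_append_of_le_length (by omega)
    have hch : List.IsChain pvStep (l.drop (l.length + 1 - k.toNat) ++ [x]) := hWsplit ▸ h2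
    have hwin := pv_window_eq (l.drop (l.length + 1 - k.toNat)) x hch
    have hlen' : ((l.drop (l.length + 1 - k.toNat)).length : Int) = k - 1 := by
      simp; omega
    rw [hlen'] at hwin
    rw [show x - (k - 1) = x - k + 1 by ring] at hwin
    rw [hwin, hWsplit]
  · rw [if_neg hge]
    rw [if_neg (fun hc => hge (by
      have := (pv_run_ge_iff l x k.toNat (by omega)).mpr hc
      rwa [Int.toNat_of_nonneg (by omega)] at this))]
    simp

-- the full state of B's fold
theorem pv_state (k : Int) (hk : 1 ≤ k) (l : List Int) :
    l.foldl
      (fun (st : List (List Int) × Int × Option Int) x =>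
        let run : Int := match st.2.2 with
          | some p => if p + 1 = x then st.2.1 + 1 else 1
          | none => 1
        let res := if k ≤ run
          then st.1 ++ [PySem.List.pyRange (x - k + 1) (x + 1) 1]
          else st.1
        (res, run, some x)) ([], 0, none)
    = (extract_continuous_elements l k, pvRunVal l, l.getLast?) := by
  induction l using List.reverseRecOn with
  | nil => simp [pv_A_nil k hk, pvRunVal, pvRrun]
  | append_singleton l x ih =>
    rw [List.foldl_concat, ih]
    rcases hgl : l.getLast? with _ | p
    · have hl : l = [] := List.getLast?_eq_none_iff.mp hgl
      subst hl
      dsimp only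
      have he := pv_emit_eq [] x k hk
      rw [show pvRunVal ([] ++ [x]) = 1 by simp [pvRunVal, pvRrun]] at he
      rw [he]
      simp [pvRunVal, pvRrun]
    · dsimp only
      have he := pv_emit_eq l x k hk
      rw [pvRunVal_snoc, hgl] at he
      dsimp only at he
      rw [List.getLast?_concat, pvRunVal_snoc, hgl]
      dsimp only
      rw [he]

-- ===== VERDICT (by name: the statement is the Claim_ definition above) =====
theorem extract_continuous_elements_spec : Claim_equal_extract_continuous_elements := by
  intro lst k _ hk
  unfold Spec_extract_continuous_elements extract_continuous_elements_alt
  rw [pv_state k hk lst]
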